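-- pv_equiv track=rewrite | github.com/kwshi/aoc-2021 | 16/16.py | parse_value
-- ===== SOURCE A (Python) =====
-- def parse_value(bits: str, pos: int):
--     chunks: list[str] = []
--     while True:
--         first, chunk = bits[pos], bits[pos + 1 : pos + 5]
--         pos += 5
--
--         chunks.append(chunk)
--
--         if first == "0":
--             break
--
--     val = int("".join(chunks), 2)
--     return val, pos
-- ===== SOURCE B (Python) =====
-- def parse_value(bits: str, pos: int):
--     val = 0
--     while True:
--         first = bits[pos]
--         for c in bits[pos + 1 : pos + 5]:
--             val = val * 2 + (1 if c == "1" else 0)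
--         pos += 5
--         if first == "0":
--             break
--     return val, pos
-- ===== Notes on version B (the rewrite author's own statement) =====
-- stated objective: simpler
-- what changed: B drops the chunk list, the final join and the int(.,2) parse: it maintains a single running integer accumulator, folding each payload bit into it as it is read, so no intermediate string is ever built.
-- outside the precondition, e.g. on parse_value('011 ', 0): A returns (3, 5), B returns (6, 5)
import Mathlib
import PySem

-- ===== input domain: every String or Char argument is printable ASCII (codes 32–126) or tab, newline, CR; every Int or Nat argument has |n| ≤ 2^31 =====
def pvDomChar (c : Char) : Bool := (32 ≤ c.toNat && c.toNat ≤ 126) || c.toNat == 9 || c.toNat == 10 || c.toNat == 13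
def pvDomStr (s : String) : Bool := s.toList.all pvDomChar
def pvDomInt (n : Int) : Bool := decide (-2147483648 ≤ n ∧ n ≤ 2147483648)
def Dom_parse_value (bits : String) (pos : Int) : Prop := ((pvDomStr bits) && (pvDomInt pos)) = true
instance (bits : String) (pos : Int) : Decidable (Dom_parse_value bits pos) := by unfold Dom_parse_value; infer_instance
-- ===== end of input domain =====

-- B replaces A's chunk list + join + int(.,2) by a running integer accumulator (same return value; objective: simpler).

-- shared one-bit step: a*2 + (1 if c == '1' else 0)
def pvBit (a : Int) (c : Char) : Int := a * 2 + (if c = '1' then 1 else 0)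

-- ===== PORT A =====
-- port of int(s, 2); exact on nonempty strings of '0'/'1' chars, the only strings Pre_ lets A build
def pvIntBin (cs : List Char) : Int := cs.foldl pvBit 0

-- the 'while True' loop of A; fuel only makes the recursion total (|bits|+1 iterations always suffice inside Pre_);
-- the 'none' branch is Python's IndexError, excluded by Pre_
def pvLoopA (bs : List Char) : Nat → Int → List (List Char) → (List (List Char) × Int)
  | 0, pos, chunks => (chunks, pos)
  | fuel+1, pos, chunks =>
    match PySem.List.pyGet? bs pos with
    | none => (chunks, pos)
    | some first =>
      let chunk := PySem.List.slice bs (some (pos + 1)) (some (pos + 5))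
      if first = '0' then (chunks ++ [chunk], pos + 5)
      else pvLoopA bs fuel (pos + 5) (chunks ++ [chunk])

def parse_value (bits : String) (pos : Int) : Int × Int :=
  let bs := bits.toList
  let r := pvLoopA bs (bs.length + 1) pos []
  (pvIntBin (r.1.foldl (· ++ ·) []), r.2)

-- ===== PORT B =====
def pvLoopB (bs : List Char) : Nat → Int → Int → (Int × Int)
  | 0, pos, val => (val, pos)
  | fuel+1, pos, val =>
    match PySem.List.pyGet? bs pos with
    | none => (val, pos)
    | some first =>
      let val' := (PySem.List.slice bs (some (pos + 1)) (some (pos + 5))).foldl (fun a c => a * 2 + (if c = '1' then 1 else 0)) val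
      if first = '0' then (val', pos + 5)
      else pvLoopB bs fuel (pos + 5) val'

def parse_value_alt (bits : String) (pos : Int) : Int × Int :=
  pvLoopB bits.toList (bits.toList.length + 1) pos 0

-- ===== PRECONDITION & SPEC =====
-- Pre_ excludes exactly (a) the inputs on which A raises (IndexError: no '0' first-bit reached in
-- range; ValueError: empty joined payload or a char int(.,2) rejects), and (b) inputs whose scanned
-- payload contains a non-'0'/'1' char that int(.,2) happens to strip (whitespace / sign / '_'), where
-- A's returned value is an accident of int's lenient parsing (cite ("011 ", 0)).
def Pre_parse_value (bits : String) (pos : Int) : Prop :=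
  0 < bits.toList.length ∧ -(bits.toList.length : Int) ≤ pos ∧
  ∃ k < bits.toList.length + 1,
    pos + 5 * (k : Int) < (bits.toList.length : Int) ∧
    PySem.List.pyGet? bits.toList (pos + 5 * (k : Int)) = some '0' ∧
    (∀ j < k, PySem.List.pyGet? bits.toList (pos + 5 * (j : Int)) ≠ some '0') ∧
    (∀ j < k + 1, (PySem.List.slice bits.toList (some (pos + 5 * (j : Int) + 1))
        (some (pos + 5 * (j : Int) + 5))).all (fun c => c == '0' || c == '1') = true) ∧
    (∃ j < k + 1, PySem.List.slice bits.toList (some (pos + 5 * (j : Int) + 1))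
        (some (pos + 5 * (j : Int) + 5)) ≠ [])
instance (bits : String) (pos : Int) : Decidable (Pre_parse_value bits pos) := by
  unfold Pre_parse_value; infer_instance
def pvWitness_parse_value : String × Int := ("00100", 0)

def Spec_parse_value (bits : String) (pos : Int) (out : Int × Int) : Prop := out = parse_value_alt bits pos
instance (bits : String) (pos : Int) (out : Int × Int) : Decidable (Spec_parse_value bits pos out) := by unfold Spec_parse_value; infer_instance

-- ===== CLAIM (what is proved, stated in full; the proofs are below) =====
def Claim_equal_parse_value : Prop := ∀ (bits : String) (pos : Int), Dom_parse_value bits pos → Pre_parse_value bits pos → Spec_parse_value bits pos (parse_value bits pos)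

-- ===== LEMMAS AND PROOFS =====
-- fold a list of chunks into the accumulator, chunk by chunk
def pvF (v : Int) (cs : List (List Char)) : Int := cs.foldl (fun a c => c.foldl pvBit a) v

lemma pvLoopA_acc (bs : List Char) :
    ∀ (fuel : Nat) (pos : Int) (chunks : List (List Char)),
      pvLoopA bs fuel pos chunks =
        (chunks ++ (pvLoopA bs fuel pos []).1, (pvLoopA bs fuel pos []).2) := by
  intro fuel
  induction fuel with
  | zero => intro pos chunks; simp [pvLoopA]
  | succ n ih =>
    intro pos chunks
    simp only [pvLoopA]
    cases h : PySem.List.pyGet? bs pos with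
    | none => simp
    | some first =>
      by_cases h0 : first = '0'
      · simp [h0]
      · simp only [h0, if_false]
        simp only [List.nil_append]
        rw [ih (pos + 5) (chunks ++ [PySem.List.slice bs (some (pos + 1)) (some (pos + 5))]),
            ih (pos + 5) ([PySem.List.slice bs (some (pos + 1)) (some (pos + 5))])]
        simp

lemma pvBit_eq : (fun (a : Int) (c : Char) => a * 2 + (if c = '1' then 1 else 0)) = pvBit := rfl

lemma pvLoopB_rel (bs : List Char) :
    ∀ (fuel : Nat) (pos : Int) (v : Int),
      pvLoopB bs fuel pos v =
        (pvF v (pvLoopA bs fuel pos []).1, (pvLoopA bs fuel pos []).2) := by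
  intro fuel
  induction fuel with
  | zero => intro pos v; simp [pvLoopA, pvLoopB, pvF]
  | succ n ih =>
    intro pos v
    simp only [pvLoopA, pvLoopB]
    cases h : PySem.List.pyGet? bs pos with
    | none => simp [pvF]
    | some first =>
      by_cases h0 : first = '0'
      · simp [h0, pvF, pvBit_eq]
      · simp only [h0, if_false]
        rw [ih (pos + 5)]
        simp only [List.nil_append]
        rw [pvLoopA_acc bs n (pos + 5)
              ([PySem.List.slice bs (some (pos + 1)) (some (pos + 5))])]
        simp [pvF, pvBit_eq]

lemma pvJoin_fold :
    ∀ (cs : List (List Char)) (s : List Char) (a : Int),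
      (cs.foldl (· ++ ·) s).foldl pvBit a = pvF (s.foldl pvBit a) cs := by
  intro cs
  induction cs with
  | nil => intro s a; simp [pvF]
  | cons c cs ih =>
    intro s a
    simp only [List.foldl_cons, pvF]
    rw [ih (s ++ c) a]
    simp [pvF, List.foldl_append]

-- ===== VERDICT (by name: the statement is the Claim_ definition above) =====
theorem parse_value_spec : Claim_equal_parse_value := by
  intro bits pos _ _
  unfold Spec_parse_value parse_value parse_value_alt
  rw [pvLoopB_rel]
  simp only [pvIntBin]
  rw [pvJoin_fold]
  simp
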